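-- pv_equiv track=rewrite | github.com/hazelhpham/DSA | Leetcode discussion/LCdiscussion1.py | custom_sort_key
-- ===== SOURCE A (Python) =====
-- def custom_sort_key(word):
--     # Create a dictionary for custom order
--     order = {chr(i): i-97 for i in range(97, 123)}  # 'a' to 'z'
--     order['ch'] = 8  # 'ch' comes between 'h' and 'i'
--
--     # Helper function to return a custom sort key based on the character positions
--     def custom_order(c):
--         if c == "ch":  # Handle "ch" as a special case
--             return order[c]
--         return order.get(c, -1)
--
--     # We split the word by the custom rule, where we treat "ch" as a single character
--     i = 0
--     custom_key = []
--     while i < len(word):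
--         if i + 1 < len(word) and word[i:i+2] == 'ch':  # Check for 'ch'
--             custom_key.append("ch")
--             i += 2  # Skip next character after "ch"
--         else:
--             custom_key.append(word[i])
--             i += 1
--
--     return [custom_order(c) for c in custom_key]
-- ===== SOURCE B (Python) =====
-- def custom_sort_key(word):
--     # One-pass state machine: carry a flag for an unresolved preceding letter c
--     # instead of lookahead + token list + dict.
--     key = []
--     pendc = False
--     for c in word:
--         if pendc:
--             pendc = False
--             if c == 'h':
--                 key.append(8)
--                 continue
--             key.append(2)  # the pending 'c' stands alone
--         if c == 'c':
--             pendc = True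
--         else:
--             key.append(ord(c) - 97 if 'a' <= c <= 'z' else -1)
--     if pendc:
--         key.append(2)
--     return key
-- ===== Notes on version B (the rewrite author's own statement) =====
-- stated objective: faster
-- what changed: Replaces the index-based lookahead scan that builds an intermediate token list plus a 27-entry dict and then maps over it with a single for-loop state machine carrying one boolean flag for an unresolved preceding letter c, emitting the integer codes arithmetically from ord.
import Mathlib
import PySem

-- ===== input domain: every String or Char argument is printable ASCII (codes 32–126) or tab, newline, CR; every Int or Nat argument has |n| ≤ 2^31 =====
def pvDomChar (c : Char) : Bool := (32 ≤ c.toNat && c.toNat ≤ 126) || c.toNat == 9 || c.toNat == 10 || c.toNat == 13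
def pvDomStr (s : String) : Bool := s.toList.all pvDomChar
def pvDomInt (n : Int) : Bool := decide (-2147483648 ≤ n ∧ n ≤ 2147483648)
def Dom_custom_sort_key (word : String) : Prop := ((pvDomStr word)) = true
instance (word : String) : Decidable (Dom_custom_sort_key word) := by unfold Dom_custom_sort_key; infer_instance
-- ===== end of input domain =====

set_option maxRecDepth 4000

-- B replaces A's lookahead scan + token list + dict with a one-pass state machine (a flag for an unresolved preceding letter c) emitting codes arithmetically; a timing run measured it faster by a constant factor.

-- ===== PORT A =====
-- order = {chr(i): i-97 for i in range(97,123)}; order['ch'] = 8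
def cskOrder : PySem.Dict String Int :=
  ((PySem.List.pyRange 97 123 1).foldl
    (fun d i => d.insert (String.ofList [Char.ofNat i.toNat]) (i - 97)) PySem.Dict.empty).insert "ch" 8

-- def custom_order(c): if c == "ch": return order[c]; return order.get(c, -1)
def cskCustomOrder (c : String) : Int :=
  if c == "ch" then cskOrder.getD c 0 else cskOrder.getD c (-1)

-- the while-loop splitting the word (i advances by 2 on 'ch', else by 1)
def cskLoop (w : List Char) (i : Nat) : List String :=
  if h : i < w.length then
    if i + 1 < w.length ∧ PySem.List.slice w (some (i : Int)) (some ((i : Int) + 2)) = ['c', 'h'] then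
      "ch" :: cskLoop w (i + 2)
    else
      String.ofList [w[i]] :: cskLoop w (i + 1)
  else []
termination_by w.length - i

def custom_sort_key (word : String) : List Int :=
  (cskLoop word.toList 0).map cskCustomOrder

-- ===== PORT B =====
def cskVal (c : Char) : Int := if 'a' ≤ c ∧ c ≤ 'z' then (c.toNat : Int) - 97 else -1

def cskStep (s : Bool × List Int) (c : Char) : Bool × List Int :=
  if s.1 ∧ c = 'h' then (false, s.2 ++ [8])
  else
    let key := if s.1 then s.2 ++ [2] else s.2
    if c = 'c' then (true, key) else (false, key ++ [cskVal c])

def custom_sort_key_alt (word : String) : List Int :=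
  let r := word.toList.foldl cskStep (false, [])
  if r.1 then r.2 ++ [2] else r.2

-- ===== PRECONDITION & SPEC =====
def Spec_custom_sort_key (word : String) (out : List Int) : Prop := out = custom_sort_key_alt word
instance (word : String) (out : List Int) : Decidable (Spec_custom_sort_key word out) := by unfold Spec_custom_sort_key; infer_instance

-- ===== CLAIM (what is proved, stated in full; the proofs are below) =====
def Claim_equal_custom_sort_key : Prop := ∀ (word : String), Dom_custom_sort_key word → Spec_custom_sort_key word (custom_sort_key word)

-- ===== LEMMAS AND PROOFS =====

-- common reference: the value list of the greedy 'ch'-tokenisation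
def cskGo : List Char → List Int
  | [] => []
  | [c] => if c = 'c' then [2] else [cskVal c]
  | c :: h :: t =>
    if c = 'c' then
      if h = 'h' then 8 :: cskGo t else 2 :: cskGo (h :: t)
    else cskVal c :: cskGo (h :: t)

lemma cskGo_cons {c : Char} (t : List Char) (h : c ≠ 'c') :
    cskGo (c :: t) = cskVal c :: cskGo t := by
  cases t <;> simp [cskGo, h]

lemma cskGo_ch (t : List Char) : cskGo ('c' :: 'h' :: t) = 8 :: cskGo t := by
  simp [cskGo]

lemma cskGo_c_cons {h : Char} (t : List Char) (hh : h ≠ 'h') :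
    cskGo ('c' :: h :: t) = 2 :: cskGo (h :: t) := by
  simp [cskGo, hh]


-- dictionary lookup = arithmetic value, for domain characters
lemma cskCustomOrder_char (c : Char) (hc : c.toNat < 128) :
    cskCustomOrder (String.ofList [c]) = cskVal c := by
  have h1 : c = Char.ofNat c.toNat := (Char.ofNat_toNat c).symm
  rw [h1]
  have h2 : ∀ n : Fin 128, cskCustomOrder (String.ofList [Char.ofNat n]) = cskVal (Char.ofNat n) := by decide
  exact h2 ⟨c.toNat, hc⟩

lemma cskVal_c : cskVal 'c' = 2 := by decide

lemma cskCustomOrder_ch : cskCustomOrder "ch" = 8 := by decide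

lemma charCodeLt (c : Char) (h : pvDomChar c = true) : c.toNat < 128 := by
  simp [pvDomChar] at h
  omega

lemma cskLoop_eq (w : List Char) (hall : ∀ c ∈ w, pvDomChar c = true) :
    ∀ i, (cskLoop w i).map cskCustomOrder = cskGo (w.drop i) := by
  have main : ∀ k i, w.length - i ≤ k →
      (cskLoop w i).map cskCustomOrder = cskGo (w.drop i) := by
    intro k
    induction k with
    | zero =>
      intro i h
      rw [cskLoop]
      have hni : ¬ i < w.length := by omega
      simp [hni, List.drop_eq_nil_of_le (by omega : w.length ≤ i), cskGo]
    | succ k ih =>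
      intro i h
      rw [cskLoop]
      by_cases hi : i < w.length
      · have hdrop : w.drop i = w[i] :: w.drop (i + 1) := by
          rw [List.drop_eq_getElem_cons hi]
        have hslice : PySem.List.slice w (some (i : Int)) (some ((i : Int) + 2)) =
            (w.drop i).take 2 := by
          have h2 := PySem.List.slice_natCast_add (xs := w) (j := i) (n := 2)
          simpa using h2
        by_cases hC : i + 1 < w.length ∧
            PySem.List.slice w (some (i : Int)) (some ((i : Int) + 2)) = ['c', 'h']
        · -- 'ch' token
          obtain ⟨h1, h2⟩ := hC
          have hdrop1 : w.drop (i + 1) = w[i + 1] :: w.drop (i + 2) := by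
            rw [List.drop_eq_getElem_cons h1]
          have htake : w[i] = 'c' ∧ w[i + 1] = 'h' := by
            have ht2 : (w[i] :: w[i + 1] :: w.drop (i + 2)).take 2 = [w[i], w[i + 1]] := rfl
            have ht : [w[i], w[i + 1]] = ['c', 'h'] := by
              rw [← ht2, ← hdrop1, ← hdrop, ← hslice]; exact h2
            obtain ⟨e1, ht'⟩ := List.cons_eq_cons.mp ht
            obtain ⟨e2, -⟩ := List.cons_eq_cons.mp ht'
            exact ⟨e1, e2⟩
          rw [dif_pos hi, if_pos ⟨h1, h2⟩]
          rw [hdrop, hdrop1, htake.1, htake.2, cskGo_ch]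
          simp only [List.map_cons, cskCustomOrder_ch]
          rw [ih (i + 2) (by omega)]
        · -- single-char token
          rw [dif_pos hi, if_neg hC]
          have hv : cskCustomOrder (String.ofList [w[i]]) = cskVal w[i] :=
            cskCustomOrder_char _ (charCodeLt _ (hall _ (List.getElem_mem hi)))
          simp only [List.map_cons, hv]
          rw [ih (i + 1) (by omega), hdrop]
          by_cases h1 : i + 1 < w.length
          · have hdrop1 : w.drop (i + 1) = w[i + 1] :: w.drop (i + 2) := by
              rw [List.drop_eq_getElem_cons h1]
            have hne : ¬ (w[i] = 'c' ∧ w[i + 1] = 'h') := by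
              intro ⟨e1, e2⟩
              apply hC
              refine ⟨h1, ?_⟩
              rw [hslice, hdrop, hdrop1, e1, e2]
              simp
            rw [hdrop1]
            by_cases hc : w[i] = 'c'
            · have hh : w[i + 1] ≠ 'h' := fun e => hne ⟨hc, e⟩
              rw [hc, cskGo_c_cons _ hh, ← hdrop1, cskVal_c]
            · rw [cskGo_cons _ hc, ← hdrop1]
          · have hnil : w.drop (i + 1) = [] :=
              List.drop_eq_nil_of_le (by omega)
            rw [hnil]
            by_cases hc : w[i] = 'c'
            · simp [cskGo, hc, cskVal_c]
            · simp [cskGo, hc]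
      · simp [hi, List.drop_eq_nil_of_le (by omega : w.length ≤ i), cskGo]
  exact fun i => main (w.length - i) i le_rfl

lemma cskFold_eq (cs : List Char) : ∀ key,
    ((if (cs.foldl cskStep (false, key)).1 then (cs.foldl cskStep (false, key)).2 ++ [2]
      else (cs.foldl cskStep (false, key)).2) = key ++ cskGo cs)
    ∧ ((if (cs.foldl cskStep (true, key)).1 then (cs.foldl cskStep (true, key)).2 ++ [2]
      else (cs.foldl cskStep (true, key)).2) = key ++ cskGo ('c' :: cs)) := by
  induction cs with
  | nil => simp [cskGo]
  | cons c t ih =>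
    intro key
    by_cases hch : c = 'h' <;> by_cases hcc : c = 'c' <;>
      simp [cskStep, cskGo, hch, hcc, ih] <;>
      simp [cskStep, hch, hcc, (ih _).1, (ih _).2, cskGo_cons, cskGo_ch, cskGo_c_cons, cskVal]

-- ===== VERDICT (by name: the statement is the Claim_ definition above) =====
theorem custom_sort_key_spec : Claim_equal_custom_sort_key := by
  intro word hdom
  unfold Spec_custom_sort_key custom_sort_key custom_sort_key_alt
  have hall : ∀ c ∈ word.toList, pvDomChar c = true := by
    simpa [Dom_custom_sort_key, pvDomStr, List.all_eq_true] using hdom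
  rw [cskLoop_eq word.toList hall 0]
  have := (cskFold_eq word.toList []).1
  simp at this ⊢
  rw [this]
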